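-- pv_equiv track=rewrite | github.com/kaefcatcher/wifi_lib | phy/scrambler.py | scrambler
-- ===== SOURCE A (Python) =====
-- from typing import List
--
-- def scrambler(seed: int, data_bits: List[int]) -> List[int]:
--     """
--     Scramble the input data using a 7-bit LFSR scrambler based on IEEE 802.11.2020.
--
--     Parameters:
--     - seed (int): The initial seed for the scrambler (7 bits, 0-127).
--     - data_bits (List[int]): The input data bits to be scrambled (list of 0s and 1s).
--
--     Returns:
--     - List[int]: The scrambled data bits (list of 0s and 1s).
--     """
--     assert (seed >= 0 and seed <= 127), "Seed must be a 7-bit integer (0-127)."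
--
--     lfsr = [(seed >> i) & 1 for i in range(6, -1, -1)]
--
--     scrambled_bits = []
--
--     for bit in data_bits:
--         new_bit = lfsr[3] ^ lfsr[6]
--         scrambled_bit = bit ^ new_bit
--         scrambled_bits.append(scrambled_bit)
--         lfsr = [new_bit] + lfsr[:-1]
--
--     return scrambled_bits
-- ===== SOURCE B (Python) =====
-- from typing import List
--
-- def scrambler(seed: int, data_bits: List[int]) -> List[int]:
--     """Period-table rewrite: the 7-bit LFSR keystream is data-independent and periodic
--     with period 127 (state returns to the seed after 127 steps), so precompute one full
--     period once from an integer register, then mask each data bit by table lookup."""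
--     assert (seed >= 0 and seed <= 127), "Seed must be a 7-bit integer (0-127)."
--
--     state = seed
--     period = []
--     for _ in range(127):
--         fb = ((state >> 3) ^ state) & 1
--         period.append(fb)
--         state = (state >> 1) | (fb << 6)
--
--     return [b ^ period[i % 127] for i, b in enumerate(data_bits)]
-- ===== Notes on version B (the rewrite author's own statement) =====
-- stated objective: faster
-- what changed: B exploits that the 7-bit LFSR keystream is data-independent and periodic with period 127: it precomputes one full period once from an integer register (fixed 127 iterations regardless of input length), then masks each data bit by a table lookup period[i % 127], instead of A's per-bit loop that rebuilds a 7-element list register for every data bit.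
import Mathlib
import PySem

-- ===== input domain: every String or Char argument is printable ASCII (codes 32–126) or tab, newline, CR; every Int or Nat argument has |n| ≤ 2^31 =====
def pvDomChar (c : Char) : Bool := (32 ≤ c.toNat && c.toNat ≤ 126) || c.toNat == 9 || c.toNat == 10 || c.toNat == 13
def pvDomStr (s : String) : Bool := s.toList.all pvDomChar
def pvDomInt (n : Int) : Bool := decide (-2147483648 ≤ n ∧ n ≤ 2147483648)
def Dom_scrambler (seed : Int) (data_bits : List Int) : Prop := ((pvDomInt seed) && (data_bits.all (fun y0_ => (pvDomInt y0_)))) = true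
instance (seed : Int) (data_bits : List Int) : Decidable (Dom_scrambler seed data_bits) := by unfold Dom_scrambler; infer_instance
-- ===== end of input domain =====

-- B precomputes one full 127-bit period of the data-independent keystream from an integer
-- register, then masks each data bit by table lookup period[i % 127] instead of A's per-bit
-- list-register rebuild (a constant-factor mechanism; a timing run could not measure it).

-- ===== PORT A =====
-- one iteration of A's for-loop: state = (lfsr register, scrambled_bits accumulator)
-- (lfsr[3]/lfsr[6] never raise: the register always has 7 entries, so .getD 0 is never taken)
def scramblerStep (st : List Int × List Int) (bit : Int) : List Int × List Int :=
  let new_bit := PySem.Int.bxor ((PySem.List.pyGet? st.1 3).getD 0) ((PySem.List.pyGet? st.1 6).getD 0)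
  let scrambled_bit := PySem.Int.bxor bit new_bit
  (new_bit :: PySem.List.slice st.1 none (some (-1)), st.2 ++ [scrambled_bit])

def scrambler (seed : Int) (data_bits : List Int) : List Int :=
  -- the assert raises outside Pre_scrambler; inside Pre_ it passes
  let lfsr := (PySem.List.pyRange 6 (-1) (-1)).map (fun i => PySem.Int.band (seed >>> i.toNat) 1)
  (data_bits.foldl scramblerStep (lfsr, [])).2

-- ===== PORT B =====
-- one iteration of B's fixed 127-step period loop: state = (integer register, period accumulator)
def scramblerAltStep (st : Int × List Int) (_i : Int) : Int × List Int :=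
  let fb := PySem.Int.band (PySem.Int.bxor (st.1 >>> (3 : Nat)) st.1) 1
  (PySem.Int.bor (st.1 >>> (1 : Nat)) (fb <<< (6 : Nat)), st.2 ++ [fb])

def scrambler_alt (seed : Int) (data_bits : List Int) : List Int :=
  -- the assert raises outside Pre_scrambler; inside Pre_ it passes
  let period := ((PySem.List.pyRange 0 127 1).foldl scramblerAltStep (seed, [])).2
  -- period[i % 127] never raises: 0 ≤ i % 127 < 127 = len(period), so .getD 0 is never taken
  (PySem.List.enumerate data_bits).map
    (fun p => PySem.Int.bxor p.2 ((PySem.List.pyGet? period (PySem.Int.mod p.1 127)).getD 0))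

-- ===== PRECONDITION & SPEC =====
-- Pre_ excludes exactly the inputs on which A's assert raises AssertionError (seed outside 0..127)
def Pre_scrambler (seed : Int) (data_bits : List Int) : Prop := 0 ≤ seed ∧ seed ≤ 127
instance (seed : Int) (data_bits : List Int) : Decidable (Pre_scrambler seed data_bits) := by unfold Pre_scrambler; infer_instance
def pvWitness_scrambler : Int × List Int := (93, [1, 0, 1, 1, 0])

def Spec_scrambler (seed : Int) (data_bits : List Int) (out : List Int) : Prop := out = scrambler_alt seed data_bits
instance (seed : Int) (data_bits : List Int) (out : List Int) : Decidable (Spec_scrambler seed data_bits out) := by unfold Spec_scrambler; infer_instance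

-- ===== CLAIM (what is proved, stated in full; the proofs are below) =====
def Claim_equal_scrambler : Prop := ∀ (seed : Int) (data_bits : List Int), Dom_scrambler seed data_bits → Pre_scrambler seed data_bits → Spec_scrambler seed data_bits (scrambler seed data_bits)

-- ===== LEMMAS AND PROOFS =====

-- A's output stream when the list register holds [a,b,c,d,e,f,g]
def aOut (a b c d e f g : Int) : List Int → List Int
  | [] => []
  | x :: xs => PySem.Int.bxor x (PySem.Int.bxor d g) :: aOut (PySem.Int.bxor d g) a b c d e f xs

-- A's keystream generated from the list register [a,b,c,d,e,f,g]
def ks (a b c d e f g : Int) : List Int → List Int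
  | [] => []
  | _ :: xs => PySem.Int.bxor d g :: ks (PySem.Int.bxor d g) a b c d e f xs

-- B's primitives: feedback bit, next integer register, bit extraction, t-th keystream bit
def fbI (s : Int) : Int := PySem.Int.band (PySem.Int.bxor (s >>> (3 : Nat)) s) 1
def nxt (s : Int) : Int := PySem.Int.bor (s >>> (1 : Nat)) (fbI s <<< (6 : Nat))
def bitv (i : Nat) (s : Int) : Int := PySem.Int.band (s >>> (i : Int)) 1
def kI (s : Int) (t : Nat) : Int := fbI (nxt^[t] s)
def intKs (s : Int) : Nat → List Int
  | 0 => []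
  | n + 1 => fbI s :: intKs (nxt s) n

theorem aOut_eq_zip (ds : List Int) : ∀ a b c d e f g : Int,
    aOut a b c d e f g ds = List.zipWith (fun b k => PySem.Int.bxor b k) ds (ks a b c d e f g ds) := by
  induction ds with
  | nil => intro _ _ _ _ _ _ _; simp [aOut, ks]
  | cons x xs ih => intro a b c d e f g; simp [aOut, ks, ih]

theorem foldl_scramblerStep (ds : List Int) : ∀ (a b c d e f g : Int) (acc : List Int),
    (ds.foldl scramblerStep ([a, b, c, d, e, f, g], acc)).2 = acc ++ aOut a b c d e f g ds := by
  induction ds with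
  | nil => intro a b c d e f g acc; simp [aOut]
  | cons x xs ih =>
      intro a b c d e f g acc
      have hstep : scramblerStep ([a, b, c, d, e, f, g], acc) x =
          ([PySem.Int.bxor d g, a, b, c, d, e, f], acc ++ [PySem.Int.bxor x (PySem.Int.bxor d g)]) := by
        simp [scramblerStep, PySem.List.pyGet?, PySem.List.pyIdx?, PySem.List.slice_to_neg_one]
      simp only [List.foldl_cons, hstep, ih, aOut]
      simp

theorem foldl_scramblerAltStep (l : List Int) : ∀ (s : Int) (acc : List Int),
    (l.foldl scramblerAltStep (s, acc)).2 = acc ++ intKs s l.length := by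
  induction l with
  | nil => intro s acc; simp [intKs]
  | cons x xs ih =>
      intro s acc
      have hstep : scramblerAltStep (s, acc) x = (nxt s, acc ++ [fbI s]) := by
        simp [scramblerAltStep, fbI, nxt]
      simp only [List.foldl_cons, hstep, ih, List.length_cons, intKs]
      simp

-- the per-state facts relating the integer register to A's bit register (128 cases)
theorem stepFacts : ∀ s : Int, 0 ≤ s → s < 128 →
    fbI s = PySem.Int.bxor (bitv 3 s) (bitv 0 s) ∧
    bitv 6 (nxt s) = fbI s ∧ bitv 5 (nxt s) = bitv 6 s ∧ bitv 4 (nxt s) = bitv 5 s ∧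
    bitv 3 (nxt s) = bitv 4 s ∧ bitv 2 (nxt s) = bitv 3 s ∧ bitv 1 (nxt s) = bitv 2 s ∧
    bitv 0 (nxt s) = bitv 1 s ∧ 0 ≤ nxt s ∧ nxt s < 128 := by
  intro s h1 h2
  interval_cases s <;> decide

-- the register returns to its seed after 127 steps (128 cases)
set_option maxRecDepth 40000 in
theorem nxt_iter127 : ∀ s : Int, 0 ≤ s → s < 128 → nxt^[127] s = s := by
  intro s h1 h2
  interval_cases s <;> decide

theorem kI_succ (s : Int) (t : Nat) : kI s (t + 1) = kI (nxt s) t := by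
  simp [kI, Function.iterate_succ_apply]

theorem kI_add127 (s : Int) (h1 : 0 ≤ s) (h2 : s < 128) (t : Nat) : kI s (t + 127) = kI s t := by
  unfold kI
  rw [Function.iterate_add_apply, nxt_iter127 s h1 h2]

theorem kI_mod (s : Int) (h1 : 0 ≤ s) (h2 : s < 128) : ∀ t, kI s t = kI s (t % 127) := by
  intro t
  induction t using Nat.strong_induction_on with
  | _ t ih =>
    by_cases h : t < 127
    · rw [Nat.mod_eq_of_lt h]
    · have h127 : t = (t - 127) + 127 := by omega
      rw [h127, kI_add127 s h1 h2, Nat.add_mod_right]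
      exact ih (t - 127) (by omega)

theorem intKs_eq_map (n : Nat) : ∀ s : Int, intKs s n = (List.range n).map (kI s) := by
  induction n with
  | zero => intro s; simp [intKs]
  | succ n ih =>
      intro s
      rw [List.range_succ_eq_map]
      simp only [List.map_cons, List.map_map, intKs]
      refine congrArg₂ List.cons rfl ?_
      rw [ih (nxt s)]
      refine List.map_congr_left ?_
      intro i _
      exact (kI_succ s i).symm

theorem length_intKs (s : Int) (n : Nat) : (intKs s n).length = n := by
  rw [intKs_eq_map]; simp

theorem ks_eq_intKs (ds : List Int) : ∀ s : Int, 0 ≤ s → s < 128 →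
    ks (bitv 6 s) (bitv 5 s) (bitv 4 s) (bitv 3 s) (bitv 2 s) (bitv 1 s) (bitv 0 s) ds
      = intKs s ds.length := by
  induction ds with
  | nil => intro s _ _; simp [ks, intKs]
  | cons x xs ih =>
      intro s hge hlt
      obtain ⟨hfb, h6, h5, h4, h3, h2, h1, h0, hge', hlt'⟩ := stepFacts s hge hlt
      simp only [ks, List.length_cons, intKs]
      rw [← hfb]
      refine congrArg₂ List.cons rfl ?_
      rw [show fbI s = bitv 6 (nxt s) from h6.symm]
      rw [show bitv 6 s = bitv 5 (nxt s) from h5.symm, show bitv 5 s = bitv 4 (nxt s) from h4.symm,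
          show bitv 4 s = bitv 3 (nxt s) from h3.symm, show bitv 3 s = bitv 2 (nxt s) from h2.symm,
          show bitv 2 s = bitv 1 (nxt s) from h1.symm, show bitv 1 s = bitv 0 (nxt s) from h0.symm]
      exact ih (nxt s) hge' hlt'

-- ===== VERDICT (by name: the statement is the Claim_ definition above) =====
set_option maxRecDepth 40000 in
theorem scrambler_spec : Claim_equal_scrambler := by
  intro seed ds _ hpre
  obtain ⟨hge, hle⟩ := hpre
  unfold Spec_scrambler scrambler scrambler_alt
  have hr1 : PySem.List.pyRange 6 (-1) (-1) = [6, 5, 4, 3, 2, 1, 0] := by decide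
  rw [hr1]
  simp only [List.map]
  norm_num
  rw [show PySem.Int.band (seed >>> (6:Int)) 1 = bitv 6 seed from by norm_num [bitv],
      show PySem.Int.band (seed >>> (5:Int)) 1 = bitv 5 seed from by norm_num [bitv],
      show PySem.Int.band (seed >>> (4:Int)) 1 = bitv 4 seed from by norm_num [bitv],
      show PySem.Int.band (seed >>> (3:Int)) 1 = bitv 3 seed from by norm_num [bitv],
      show PySem.Int.band (seed >>> (2:Int)) 1 = bitv 2 seed from by norm_num [bitv],
      show PySem.Int.band (seed >>> (1:Int)) 1 = bitv 1 seed from by norm_num [bitv],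
      show PySem.Int.band (seed >>> (0:Int)) 1 = bitv 0 seed from by norm_num [bitv]]
  rw [foldl_scramblerStep ds (bitv 6 seed) (bitv 5 seed) (bitv 4 seed) (bitv 3 seed)
        (bitv 2 seed) (bitv 1 seed) (bitv 0 seed) []]
  have hper : (List.foldl scramblerAltStep (seed, []) (PySem.List.pyRange 0 127 1)).2
      = intKs seed 127 := by
    rw [foldl_scramblerAltStep, show (PySem.List.pyRange 0 127 1).length = 127 from by decide]
    simp
  rw [hper, List.nil_append, aOut_eq_zip, ks_eq_intKs ds seed hge (by omega)]
  refine List.ext_getElem (by simp [length_intKs, PySem.List.length_enumerate]) ?_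
  intro k hk1 hk2
  have hklen : k < ds.length := by
    simpa [length_intKs] using hk1
  have hmodlt : k % 127 < 127 := Nat.mod_lt _ (by omega)
  rw [List.getElem_zipWith, List.getElem_map, PySem.List.getElem_enumerate]
  simp only [intKs_eq_map]
  rw [List.getElem_map, List.getElem_range]
  have hidx : ((0 : Int) + (k : Nat)) % 127 = ((k % 127 : Nat) : Int) := by omega
  rw [hidx, PySem.List.pyGet?_natCast]
  have hget : ((List.range 127).map (kI seed))[(k % 127 : Nat)]? = some (kI seed (k % 127)) := by
    rw [List.getElem?_eq_getElem (by simpa using hmodlt)]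
    rw [List.getElem_map, List.getElem_range]
  rw [hget, Option.getD_some, ← kI_mod seed hge (by omega) k]
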